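-- pv_equiv track=rewrite | github.com/vincentqin-sys/GP | THS/hot_win_small.py | findDrawDaysIndex
-- ===== SOURCE A (Python) =====
-- def findDrawDaysIndex(days, selDay, maxNum):
--     if not days:
--         return (0, 0)
--     if len(days) <= maxNum:
--         return (0, len(days))
--     if not selDay:
--         return (len(days) - maxNum, len(days))
--     if type(days[0]) != int:
--         for i in range(len(days)):
--             days[i] = int(days[i].replace('-', '.'))
--     #最左
--     if selDay <= days[0]:
--         return (0, maxNum)
--     #最右
--     if selDay >= days[len(days) - 1]:
--         return (len(days) - maxNum, len(days))
--
--     idx = 0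
--     for i in range(len(days) - 1): # skip last day
--         if (selDay >= days[i]) and (selDay < days[i + 1]):
--             idx = i
--             break
--     # 居中优先显示
--     fromIdx = lastIdx = idx
--     while True:
--         if lastIdx < len(days):
--             lastIdx += 1
--         if lastIdx - fromIdx >= maxNum:
--             break
--         if fromIdx > 0:
--             fromIdx -= 1
--         if lastIdx - fromIdx >= maxNum:
--             break
--     return (fromIdx, lastIdx)
-- ===== SOURCE B (Python) =====
-- def findDrawDaysIndex(days, selDay, maxNum):
--     if not days:
--         return (0, 0)
--     n = len(days)
--     if n <= maxNum:
--         return (0, n)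
--     if not selDay:
--         return (n - maxNum, n)
--     if type(days[0]) != int:
--         for i in range(n):
--             days[i] = int(days[i].replace('-', '.'))
--     if selDay <= days[0]:
--         return (0, maxNum)
--     if selDay >= days[n - 1]:
--         return (n - maxNum, n)
--     idx = next((i for i in range(n - 1)
--                 if days[i] <= selDay < days[i + 1]), 0)
--     # closed-form window: right-biased split around idx, clamped to bounds
--     w = max(maxNum, 1)          # the expansion loop always yields at least one day
--     l = w // 2
--     fromIdx, lastIdx = idx - l, idx + (w - l)
--     if fromIdx < 0:
--         return (0, w)
--     if lastIdx > n:
--         return (n - w, n)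
--     return (fromIdx, lastIdx)
-- ===== Notes on version B (the rewrite author's own statement) =====
-- stated objective: simpler
-- what changed: The while-loop that alternately expands the window right then left is replaced by a closed-form right-biased split (l = w//2, r = w - l around idx) with a single clamp at each boundary, and the break-on-first-match scan for idx becomes a next() over a generator.
import Mathlib
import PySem

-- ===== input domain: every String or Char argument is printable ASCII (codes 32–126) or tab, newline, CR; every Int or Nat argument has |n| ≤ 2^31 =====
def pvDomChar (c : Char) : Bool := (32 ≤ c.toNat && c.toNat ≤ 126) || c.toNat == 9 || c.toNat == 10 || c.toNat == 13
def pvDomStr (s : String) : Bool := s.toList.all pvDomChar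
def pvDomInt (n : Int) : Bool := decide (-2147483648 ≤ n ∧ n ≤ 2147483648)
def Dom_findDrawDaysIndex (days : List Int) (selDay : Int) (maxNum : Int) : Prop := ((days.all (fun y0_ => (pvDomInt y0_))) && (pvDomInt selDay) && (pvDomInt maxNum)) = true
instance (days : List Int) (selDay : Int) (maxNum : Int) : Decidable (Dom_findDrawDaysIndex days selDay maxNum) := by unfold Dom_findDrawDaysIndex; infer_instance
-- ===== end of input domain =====

-- B replaces A's alternating while-loop window expansion by a closed-form right-biased
-- split with boundary clamps (objective: simpler). A's in-place string-to-int conversion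
-- branch is dead for `List Int` inputs (days[0] is always an int), so neither port mutates.

-- ===== PORT A =====
-- A's `for i in range(len(days)-1)` scan with break (idx defaults to 0)
def pvScanA (days : List Int) (selDay : Int) (i : Nat) : Int :=
  if i + 1 < days.length then
    if selDay ≥ days.getD i 0 ∧ selDay < days.getD (i + 1) 0 then (i : Int)
    else pvScanA days selDay (i + 1)
  else 0
termination_by days.length - i

-- A's `while True` expansion loop, with fuel to make it total (the ports call it with
-- enough fuel: the loop runs at most maxNum+1 iterations in the reachable states)
def pvLoopA (fuel : Nat) (f la n m : Int) : Int × Int :=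
  match fuel with
  | 0 => (f, la)
  | fuel + 1 =>
    let la' := if la < n then la + 1 else la
    if la' - f ≥ m then (f, la')
    else
      let f' := if f > 0 then f - 1 else f
      if la' - f' ≥ m then (f', la')
      else pvLoopA fuel f' la' n m

def findDrawDaysIndex (days : List Int) (selDay : Int) (maxNum : Int) : List Int :=
  if days = [] then [0, 0]
  else if (days.length : Int) ≤ maxNum then [0, (days.length : Int)]
  else if selDay = 0 then [(days.length : Int) - maxNum, (days.length : Int)]
  -- `type(days[0]) != int` is always False here: the conversion loop is skipped
  else if selDay ≤ days.getD 0 0 then [0, maxNum]         -- days[0], in range: days ≠ []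
  else if selDay ≥ days.getD (days.length - 1) 0 then [(days.length : Int) - maxNum, (days.length : Int)]
  else
    let idx := pvScanA days selDay 0
    let p := pvLoopA (days.length + maxNum.natAbs + 2) idx idx (days.length : Int) maxNum
    [p.1, p.2]

-- ===== PORT B =====
def findDrawDaysIndex_alt (days : List Int) (selDay : Int) (maxNum : Int) : List Int :=
  if days = [] then [0, 0]
  else
    let n : Int := days.length
    if n ≤ maxNum then [0, n]
    else if selDay = 0 then [n - maxNum, n]
    else if selDay ≤ days.getD 0 0 then [0, maxNum]
    else if selDay ≥ days.getD (days.length - 1) 0 then [n - maxNum, n]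
    else
      let idx : Int :=
        (((List.range (days.length - 1)).find?
            (fun i => decide (days.getD i 0 ≤ selDay) && decide (selDay < days.getD (i + 1) 0))).getD 0 : Nat)
      let w := max maxNum 1
      let l := w / 2          -- Python `w // 2`: exact, divisor is positive
      let fromIdx := idx - l
      let lastIdx := idx + (w - l)
      if fromIdx < 0 then [0, w]
      else if lastIdx > n then [n - w, n]
      else [fromIdx, lastIdx]

-- ===== PRECONDITION & SPEC =====
def Spec_findDrawDaysIndex (days : List Int) (selDay : Int) (maxNum : Int) (out : List Int) : Prop := out = findDrawDaysIndex_alt days selDay maxNum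
instance (days : List Int) (selDay : Int) (maxNum : Int) (out : List Int) : Decidable (Spec_findDrawDaysIndex days selDay maxNum out) := by unfold Spec_findDrawDaysIndex; infer_instance

-- ===== CLAIM (what is proved, stated in full; the proofs are below) =====
def Claim_equal_findDrawDaysIndex : Prop := ∀ (days : List Int) (selDay : Int) (maxNum : Int), Dom_findDrawDaysIndex days selDay maxNum → Spec_findDrawDaysIndex days selDay maxNum (findDrawDaysIndex days selDay maxNum)

-- ===== LEMMAS AND PROOFS =====

-- the closed form, generalized to a mid-loop state (f, la) of pvLoopA
def pvLoopSpec (f la n m : Int) : Int × Int :=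
  if f - (m - (la - f)) / 2 < 0 then (0, m)
  else if la + ((m - (la - f)) - (m - (la - f)) / 2) > n then (n - m, n)
  else (f - (m - (la - f)) / 2, la + ((m - (la - f)) - (m - (la - f)) / 2))

theorem pvLoopA_eq_spec (fuel : Nat) (f la n m : Int)
    (h0 : 0 ≤ f) (h1 : f ≤ la) (h2 : la ≤ n) (_h3 : 1 ≤ m) (h4 : m < n)
    (h5 : la - f < m) (hfuel : (m - (la - f)).natAbs ≤ fuel) :
    pvLoopA fuel f la n m = pvLoopSpec f la n m := by
  induction fuel generalizing f la with
  | zero => exfalso; omega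
  | succ fuel ih =>
    rw [pvLoopA]
    by_cases hla : la < n
    · simp only [if_pos hla]
      by_cases hb1 : la + 1 - f ≥ m
      · -- d = 1: break after the right move
        rw [if_pos hb1]
        unfold pvLoopSpec
        split_ifs <;> simp only [Prod.mk.injEq] <;> omega
      · rw [if_neg hb1]
        by_cases hf : f > 0
        · simp only [if_pos hf]
          by_cases hb2 : la + 1 - (f - 1) ≥ m
          · -- d = 2: break after right and left moves
            rw [if_pos hb2]
            unfold pvLoopSpec
            split_ifs <;> simp only [Prod.mk.injEq] <;> omega
          · rw [if_neg hb2, ih (f - 1) (la + 1) (by omega) (by omega) (by omega) (by omega) (by omega)]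
            unfold pvLoopSpec
            split_ifs <;> simp only [Prod.mk.injEq] <;> omega
        · simp only [if_neg hf]
          by_cases hb2 : la + 1 - f ≥ m
          · rw [if_pos hb2]
            unfold pvLoopSpec
            split_ifs <;> simp only [Prod.mk.injEq] <;> omega
          · rw [if_neg hb2, ih f (la + 1) (by omega) (by omega) (by omega) (by omega) (by omega)]
            unfold pvLoopSpec
            split_ifs <;> simp only [Prod.mk.injEq] <;> omega
    · -- right side saturated: la = n, so f > n - m > 0
      simp only [if_neg hla]
      have hfn : f > 0 := by omega
      by_cases hb1 : la - f ≥ m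
      · exfalso; omega
      · rw [if_neg hb1]
        simp only [if_pos hfn]
        by_cases hb2 : la - (f - 1) ≥ m
        · rw [if_pos hb2]
          unfold pvLoopSpec
          split_ifs <;> simp only [Prod.mk.injEq] <;> omega
        · rw [if_neg hb2, ih (f - 1) la (by omega) (by omega) (by omega) (by omega) (by omega)]
          unfold pvLoopSpec
          split_ifs <;> simp only [Prod.mk.injEq] <;> omega

-- A's break-scan equals B's find? over the corresponding tail of the index range
theorem pvScanA_eq_find (days : List Int) (selDay : Int) (i : Nat) :
    pvScanA days selDay i =
      (((List.range' i (days.length - 1 - i)).find?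
          (fun j => decide (days.getD j 0 ≤ selDay) && decide (selDay < days.getD (j + 1) 0))).getD 0 : Nat) := by
  rw [pvScanA]
  by_cases h : i + 1 < days.length
  · have hk : days.length - 1 - i = (days.length - 1 - (i + 1)) + 1 := by omega
    rw [if_pos h, hk, List.range'_succ, List.find?_cons]
    by_cases h1 : days.getD i 0 ≤ selDay <;> by_cases h2 : selDay < days.getD (i + 1) 0 <;>
      simp only [List.getD] at h1 h2 ⊢ <;>
      simp [h1, h2, ge_iff_le, pvScanA_eq_find days selDay (i + 1), List.getD]
  · have hk : days.length - 1 - i = 0 := by omega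
    rw [if_neg h, hk]
    simp
termination_by days.length - i

-- the found index is < days.length - 1 (or the default 0)
theorem pvScan_lt (days : List Int) (selDay : Int)
    (p : Nat → Bool) :
    (((List.range (days.length - 1)).find? p).getD 0 : Nat) ≤ days.length - 2 ∨
      ((List.range (days.length - 1)).find? p).getD 0 = 0 := by
  cases hf : (List.range (days.length - 1)).find? p with
  | none => right; rfl
  | some j =>
    left
    have := List.find?_some hf
    have hj : j ∈ List.range (days.length - 1) := List.mem_of_find?_eq_some hf
    have := List.mem_range.mp hj
    simp only [Option.getD_some]
    omega

theorem findDrawDaysIndex_eq (days : List Int) (selDay : Int) (maxNum : Int) :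
    findDrawDaysIndex days selDay maxNum = findDrawDaysIndex_alt days selDay maxNum := by
  unfold findDrawDaysIndex findDrawDaysIndex_alt
  by_cases hnil : days = []
  · simp [hnil]
  rw [if_neg hnil, if_neg hnil]
  by_cases h1 : (days.length : Int) ≤ maxNum
  · rw [if_pos h1, if_pos h1]
  rw [if_neg h1, if_neg h1]
  by_cases h2 : selDay = 0
  · rw [if_pos h2, if_pos h2]
  rw [if_neg h2, if_neg h2]
  by_cases h3 : selDay ≤ days.getD 0 0
  · rw [if_pos h3, if_pos h3]
  rw [if_neg h3, if_neg h3]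
  by_cases h4 : selDay ≥ days.getD (days.length - 1) 0
  · rw [if_pos h4, if_pos h4]
  rw [if_neg h4, if_neg h4]
  -- middle case
  have hlen2 : 2 ≤ days.length := by
    by_contra hc
    -- length 1 (nonempty): days[0] = days[len-1], contradicting days[0] < selDay < days[last]
    have hl1 : days.length = 1 := by
      cases days with
      | nil => exact absurd rfl hnil
      | cons a t =>
        simp only [List.length_cons] at hc ⊢
        omega
    rw [hl1] at h4
    simp only [List.getD, show (1:Nat)-1 = 0 from rfl] at h3 h4
    omega
  set p : Nat → Bool := fun i => decide (days.getD i 0 ≤ selDay) && decide (selDay < days.getD (i + 1) 0) with hp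
  have hscan : pvScanA days selDay 0 = (((List.range (days.length - 1)).find? p).getD 0 : Nat) := by
    rw [pvScanA_eq_find days selDay 0]
    simp [List.range_eq_range', hp]
  set jn : Nat := ((List.range (days.length - 1)).find? p).getD 0 with hjn
  have hjlt : jn ≤ days.length - 2 := by
    rcases pvScan_lt days selDay p with h | h
    · exact h
    · rw [← hjn] at h; omega
  set idx : Int := (jn : Int) with hidx
  have hidx0 : 0 ≤ idx := by positivity
  have hidxle : idx ≤ (days.length : Int) - 2 := by
    rw [hidx]
    have : (jn : Int) ≤ ((days.length - 2 : Nat) : Int) := by exact_mod_cast hjlt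
    omega
  simp only [hscan]
  by_cases hm : 1 ≤ maxNum
  · -- w = maxNum
    rw [pvLoopA_eq_spec _ idx idx (days.length : Int) maxNum hidx0 le_rfl (by omega) hm
        (by omega) (by omega) (by simp; omega)]
    unfold pvLoopSpec
    have hw : max maxNum 1 = maxNum := by omega
    simp only [sub_self, sub_zero, hw]
    split_ifs <;> simp only [List.cons.injEq]
  · -- maxNum ≤ 0: the loop breaks in its first iteration with (idx, idx+1)
    have hfuel : days.length + maxNum.natAbs + 2 = (days.length + maxNum.natAbs + 1) + 1 := rfl
    rw [hfuel, pvLoopA]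
    have hlt : idx < (days.length : Int) := by omega
    simp only [if_pos hlt]
    rw [if_pos (by omega : idx + 1 - idx ≥ maxNum)]
    have hw : max maxNum 1 = 1 := by omega
    simp only [hw]
    norm_num
    split_ifs <;> simp only [List.cons.injEq] <;> omega

-- ===== VERDICT (by name: the statement is the Claim_ definition above) =====
theorem findDrawDaysIndex_spec : Claim_equal_findDrawDaysIndex := by
  intro days selDay maxNum _
  unfold Spec_findDrawDaysIndex
  exact findDrawDaysIndex_eq days selDay maxNum
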